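-- pv_equiv track=rewrite | github.com/weiyangzen/awesome_algorithms | Algorithms/数学-数论-0022-连分数算法/demo.py | continued_fraction_rational
-- ===== SOURCE A (Python) =====
-- from typing import List, Sequence, Tuple
--
-- def continued_fraction_rational(numer: int, denom: int) -> List[int]:
--     """Return the finite continued-fraction coefficients of numer/denom.
--
--     Uses Euclidean-division recursion:
--     x = a0 + 1/(a1 + 1/(a2 + ...)).
--     """
--     if denom == 0:
--         raise ValueError("denom must be non-zero")
--
--     if denom < 0:
--         numer, denom = -numer, -denom
--
--     coeffs: List[int] = []
--     x, y = numer, denom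
--     while y != 0:
--         a = x // y
--         coeffs.append(a)
--         x, y = y, x - a * y
--     return coeffs
-- ===== SOURCE B (Python) =====
-- def continued_fraction_rational(numer: int, denom: int):
--     """Two staged passes: first build the full Euclidean remainder sequence,
--     then derive each coefficient as the floor quotient of consecutive remainders."""
--     if denom == 0:
--         raise ValueError("denom must be non-zero")
--     if denom < 0:
--         numer, denom = -numer, -denom
--     rems = [numer, denom]
--     while rems[-1] != 0:
--         rems.append(rems[-2] % rems[-1])
--     return [rems[i] // rems[i + 1] for i in range(len(rems) - 2)]
-- ===== Notes on version B (the rewrite author's own statement) =====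
-- stated objective: alternative
-- what changed: Replaces A's single while-loop with accumulator by two staged passes: first materialize the whole Euclidean remainder sequence as a list, then derive the coefficients by floor-dividing consecutive remainder pairs in a comprehension.
import Mathlib
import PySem

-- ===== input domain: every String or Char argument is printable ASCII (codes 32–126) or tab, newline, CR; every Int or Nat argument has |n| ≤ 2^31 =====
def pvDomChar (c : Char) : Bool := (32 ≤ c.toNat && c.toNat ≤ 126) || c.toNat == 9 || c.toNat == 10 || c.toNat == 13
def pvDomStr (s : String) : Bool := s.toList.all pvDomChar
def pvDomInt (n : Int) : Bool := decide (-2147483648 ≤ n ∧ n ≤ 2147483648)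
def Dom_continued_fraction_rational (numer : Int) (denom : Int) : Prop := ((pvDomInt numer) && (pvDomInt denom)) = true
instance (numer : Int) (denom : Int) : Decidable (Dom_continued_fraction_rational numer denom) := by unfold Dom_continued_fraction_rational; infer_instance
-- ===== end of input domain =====

-- B computes the same coefficients in two staged passes (remainder sequence first, then
-- quotients of consecutive pairs) instead of A's single accumulator loop; values agree for denom ≠ 0.

-- remainder shrinks in absolute value (termination of both ports)
theorem pv_rem_lt_abs (x y : Int) (hy : y ≠ 0) :
    (PySem.Int.mod x y).natAbs < y.natAbs := by
  rcases lt_or_gt_of_ne hy with h' | h'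
  · have := PySem.Int.mod_neg_bounds x h'
    omega
  · have h1 := PySem.Int.mod_nonneg x h'
    have h2 := PySem.Int.mod_lt x h'
    omega

-- ===== PORT A =====
-- the while-loop of A, with the mutable list 'coeffs' as accumulator
def pvLoopA (x y : Int) (coeffs : List Int) : List Int :=
  if hy : y = 0 then coeffs
  else
    let a := PySem.Int.floordiv x y
    pvLoopA y (x - a * y) (coeffs ++ [a])
termination_by y.natAbs
decreasing_by
  have h := PySem.Int.floordiv_mul_add_mod x y
  have hx : x - PySem.Int.floordiv x y * y = PySem.Int.mod x y := by omega
  rw [hx]; exact pv_rem_lt_abs x y hy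

def continued_fraction_rational (numer : Int) (denom : Int) : List Int :=
  -- denom == 0 raises ValueError: excluded by Pre_
  let (numer, denom) := if denom < 0 then (-numer, -denom) else (numer, denom)
  pvLoopA numer denom []

-- ===== PORT B =====
-- first pass: the Euclidean remainder sequence [r0, r1, ..., r_k, 0]
def pvRems (x y : Int) : List Int :=
  if hy : y = 0 then [x, 0]
  else x :: pvRems y (PySem.Int.mod x y)
termination_by y.natAbs
decreasing_by exact pv_rem_lt_abs x y hy

def continued_fraction_rational_alt (numer : Int) (denom : Int) : List Int :=
  -- denom == 0 raises ValueError: excluded by Pre_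
  let (n, d) := if denom < 0 then (-numer, -denom) else (numer, denom)
  let rems := pvRems n d
  -- second pass: [rems[i] // rems[i+1] for i in range(len(rems)-2)]
  ((rems.zip rems.tail).dropLast).map (fun p => PySem.Int.floordiv p.1 p.2)

-- ===== PRECONDITION & SPEC =====
-- A raises ValueError exactly when denom = 0; those inputs are excluded.
def Pre_continued_fraction_rational (numer : Int) (denom : Int) : Prop := denom ≠ 0
instance (numer : Int) (denom : Int) : Decidable (Pre_continued_fraction_rational numer denom) := by unfold Pre_continued_fraction_rational; infer_instance
def pvWitness_continued_fraction_rational : Int × Int := (355, 113)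

def Spec_continued_fraction_rational (numer : Int) (denom : Int) (out : List Int) : Prop := out = continued_fraction_rational_alt numer denom
instance (numer : Int) (denom : Int) (out : List Int) : Decidable (Spec_continued_fraction_rational numer denom out) := by unfold Spec_continued_fraction_rational; infer_instance

-- ===== CLAIM (what is proved, stated in full; the proofs are below) =====
def Claim_equal_continued_fraction_rational : Prop := ∀ (numer : Int) (denom : Int), Dom_continued_fraction_rational numer denom → Pre_continued_fraction_rational numer denom → Spec_continued_fraction_rational numer denom (continued_fraction_rational numer denom)

-- ===== LEMMAS AND PROOFS =====
-- pvRems always starts with its two arguments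
theorem pvRems_shape (x y : Int) : ∃ t, pvRems x y = x :: y :: t := by
  rw [pvRems]
  by_cases hy : y = 0
  · exact ⟨[], by simp [hy]⟩
  · simp only [dif_neg hy]
    rw [pvRems]
    by_cases hr : PySem.Int.mod x y = 0
    · exact ⟨[0], by simp [hr]⟩
    · exact ⟨pvRems (PySem.Int.mod x y) (PySem.Int.mod y (PySem.Int.mod x y)), by simp [dif_neg hr]⟩

theorem pvLoopA_eq_alt (n : Nat) : ∀ (x y : Int) (acc : List Int), y.natAbs = n →
    pvLoopA x y acc =
      acc ++ (((pvRems x y).zip (pvRems x y).tail).dropLast).map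
        (fun p => PySem.Int.floordiv p.1 p.2) := by
  induction n using Nat.strong_induction_on with
  | _ n ih =>
    intro x y acc hn
    rw [pvLoopA, pvRems]
    by_cases hy : y = 0
    · simp [hy]
    · simp only [dif_neg hy]
      have hmod : x - PySem.Int.floordiv x y * y = PySem.Int.mod x y := by
        have h := PySem.Int.floordiv_mul_add_mod x y
        omega
      rw [hmod, ih _ (hn ▸ pv_rem_lt_abs x y hy) _ _ _ rfl]
      obtain ⟨t, ht⟩ := pvRems_shape y (PySem.Int.mod x y)
      rw [ht]
      simp

-- ===== VERDICT (by name: the statement is the Claim_ definition above) =====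
theorem continued_fraction_rational_spec : Claim_equal_continued_fraction_rational := by
  intro numer denom _ _
  unfold Spec_continued_fraction_rational continued_fraction_rational continued_fraction_rational_alt
  by_cases h : denom < 0 <;>
    simp [h, pvLoopA_eq_alt _ _ _ _ rfl]
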